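-- pv_equiv track=rewrite | github.com/Zero2oneZ/GentlyOS | security/chain/verifier.py | layer4_box
-- ===== SOURCE A (Python) =====
-- def layer4_box(text: str, rows: int, cols: int) -> str:
--     """Caesar box cipher"""
--     text = text.ljust(rows * cols, 'X')[:rows * cols]
--     grid = [text[i*cols:(i+1)*cols] for i in range(rows)]
--     result = ""
--     for col in range(cols):
--         for row in range(rows):
--             result += grid[row][col]
--     return result
-- ===== SOURCE B (Python) =====
-- def layer4_box(text: str, rows: int, cols: int) -> str:
--     """Caesar box cipher: read the padded text column-by-column via stride slices."""
--     if rows <= 0 or cols <= 0: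
--         return ""
--     n = rows * cols
--     padded = text.ljust(n, 'X')[:n]
--     return ''.join(padded[c::cols] for c in range(cols))
-- ===== Notes on version B (the rewrite author's own statement) =====
-- stated objective: simpler
-- what changed: Replaces the explicit row-grid plus col-outer/row-inner index loops with stride slices padded[c::cols] joined over the columns (no grid list, no nested loops, no per-character index arithmetic); degenerate rows<=0/cols<=0 handled by one early return.
import Mathlib
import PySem

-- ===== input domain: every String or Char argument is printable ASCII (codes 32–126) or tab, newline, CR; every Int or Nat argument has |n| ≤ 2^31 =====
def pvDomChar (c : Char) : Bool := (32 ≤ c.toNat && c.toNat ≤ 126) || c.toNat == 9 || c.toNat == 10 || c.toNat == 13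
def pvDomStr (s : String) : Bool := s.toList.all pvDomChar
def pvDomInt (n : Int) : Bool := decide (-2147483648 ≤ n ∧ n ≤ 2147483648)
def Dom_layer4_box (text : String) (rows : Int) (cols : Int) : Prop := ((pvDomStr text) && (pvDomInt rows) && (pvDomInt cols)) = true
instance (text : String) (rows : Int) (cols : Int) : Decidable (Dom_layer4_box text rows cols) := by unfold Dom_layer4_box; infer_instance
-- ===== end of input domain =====

-- B replaces A's row-grid and nested column/row index loops with stride slices
-- padded[c::cols] joined over the columns (objective: simpler; same O(rows*cols) cost).


-- ===== PORT A =====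
-- text = text.ljust(rows*cols, 'X')[:rows*cols]; grid of row slices; col-outer/row-inner
-- append loop.  grid[row][col] is ported with pyGet? (none = IndexError is never reached;
-- the port appends nothing there).
def layer4_box (text : String) (rows : Int) (cols : Int) : String :=
  let n : Int := rows * cols
  let padded : List Char :=
    PySem.List.slice (text.toList ++ List.replicate (n.toNat - text.toList.length) 'X') none (some n)
  let grid : List (List Char) :=
    (PySem.List.pyRange 0 rows 1).map
      (fun i => PySem.List.slice padded (some (i * cols)) (some ((i + 1) * cols)))
  let result : List Char :=
    (PySem.List.pyRange 0 cols 1).foldl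
      (fun acc col =>
        (PySem.List.pyRange 0 rows 1).foldl
          (fun acc2 row =>
            acc2 ++ (((PySem.List.pyGet? grid row).bind
                        (fun g => PySem.List.pyGet? g col)).elim [] (fun ch => [ch])))
          acc)
      []
  String.ofList result

-- ===== PORT B =====
-- if rows <= 0 or cols <= 0: return ""; n = rows*cols; pad/truncate with ljust+[:n];
-- join the stride slices padded[c::cols] over c in range(cols).
def layer4_box_alt (text : String) (rows : Int) (cols : Int) : String :=
  if rows ≤ 0 ∨ cols ≤ 0 then ""
  else
    let n : Nat := (rows * cols).toNat
    let padded : List Char := (text.toList ++ List.replicate (n - text.toList.length) 'X').take n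
    String.ofList
      ((PySem.List.pyRange 0 cols 1).flatMap
        (fun c => (PySem.List.slice? padded (some c) none cols).getD []))


-- ===== PRECONDITION & SPEC =====
def Spec_layer4_box (text : String) (rows : Int) (cols : Int) (out : String) : Prop := out = layer4_box_alt text rows cols
instance (text : String) (rows : Int) (cols : Int) (out : String) : Decidable (Spec_layer4_box text rows cols out) := by unfold Spec_layer4_box; infer_instance

-- ===== CLAIM (what is proved, stated in full; the proofs are below) =====
def Claim_equal_layer4_box : Prop := ∀ (text : String) (rows : Int) (cols : Int), Dom_layer4_box text rows cols → Spec_layer4_box text rows cols (layer4_box text rows cols)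

-- ===== LEMMAS AND PROOFS =====
lemma flatMap_optToList {α β : Type} (f : α → Option β) (l : List α) :
    List.flatMap (fun a => (f a).elim [] (fun b => [b])) l = List.filterMap f l := by
  induction l with
  | nil => rfl
  | cons x xs ih => cases h : f x <;> simp [List.flatMap_cons, h, ih]

lemma slice?_pos_step {α : Type} (xs : List α) (j c : Nat) (hc : 0 < c) (hj : j ≤ xs.length) :
    PySem.List.slice? xs (some (j : Int)) none (c : Int) =
      some (List.filterMap (fun k => xs[j + c * k]?)
              (List.range ((xs.length - j + c - 1) / c))) := by
  have hc' : (0:Int) < (c:Int) := by exact_mod_cast hc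
  simp only [PySem.List.slice?, PySem.List.sliceIndices]
  rw [if_neg (by omega)]
  simp only [if_neg (by omega : ¬ (c:Int) < 0), if_pos hc']
  rw [if_neg (by omega : ¬ (j:Int) < 0)]
  rw [min_eq_left (by exact_mod_cast hj)]
  have hcount : (if (j:Int) < (xs.length:Int) then (((xs.length:Int) - j + c - 1) / c).toNat else 0)
      = (xs.length - j + c - 1) / c := by
    split_ifs with h
    · have h1 : ((xs.length:Int) - j + c - 1) = ((xs.length - j + c - 1 : Nat) : Int) := by
        omega
      rw [h1]; exact_mod_cast rfl
    · have hje : j = xs.length := by omega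
      subst hje
      rw [Nat.sub_self, Nat.zero_add, Nat.div_eq_of_lt (by omega)]
  rw [hcount]
  congr 1

lemma stride_count (r c j : Nat) (hc : 0 < c) (hj : j < c) :
    (r * c - j + c - 1) / c = r := by
  rcases Nat.eq_zero_or_pos r with hr | hr
  · subst hr
    exact Nat.div_eq_of_lt (by omega)
  · have hcle : 1 * c ≤ r * c := Nat.mul_le_mul_right c hr
    have h1 : r * c - j + c - 1 = r * c + (c - 1 - j) := by omega
    have h2 : (c - 1 - j) / c = 0 := Nat.div_eq_of_lt (by omega)
    rw [h1, Nat.mul_comm r c, Nat.mul_add_div hc, h2]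
    omega

lemma colA (P : List Char) (r c j : Nat) (hr : 0 < r) (hc : 0 < c) (hj : j < c)
    (hP : P.length = r * c) :
    (PySem.List.pyRange 0 (r:Int) 1).flatMap
      (fun row =>
        (((PySem.List.pyGet?
              ((PySem.List.pyRange 0 (r:Int) 1).map
                (fun i => PySem.List.slice P (some (i * (c:Int))) (some ((i + 1) * (c:Int)))))
              row).bind
            (fun g => PySem.List.pyGet? g (j:Int))).elim [] (fun ch => [ch]))) =
      (PySem.List.slice? P (some (j:Int)) none (c:Int)).getD [] := by
  have hcle : 1 * c ≤ r * c := Nat.mul_le_mul_right c hr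
  have hjP : j ≤ P.length := by omega
  rw [slice?_pos_step P j c hc hjP, Option.getD_some, hP, stride_count r c j hc hj]
  have hstep : ∀ row ∈ PySem.List.pyRange 0 (r:Int) 1,
      (((PySem.List.pyGet?
            ((PySem.List.pyRange 0 (r:Int) 1).map
              (fun i => PySem.List.slice P (some (i * (c:Int))) (some ((i + 1) * (c:Int)))))
            row).bind
          (fun g => PySem.List.pyGet? g (j:Int))).elim [] (fun ch => [ch]))
        = ((P[j + c * row.toNat]?).elim [] (fun ch => [ch])) := by
    intro row hrow
    obtain ⟨h0, h1⟩ := (PySem.List.mem_pyRange_one).mp hrow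
    lift row to Nat using h0 with k
    have hkr : k < r := by exact_mod_cast h1
    rw [PySem.List.pyGet?_natCast, PySem.List.getElem?_map_pyRange_zero _ r k hkr]
    have e1 : ((k:Int) * (c:Int)) = ((k * c : Nat) : Int) := by push_cast; ring
    have e2 : (((k:Int) + 1) * (c:Int)) = ((k * c + c : Nat) : Int) := by push_cast; ring
    rw [Option.bind_some, e1, e2, PySem.List.slice_natCast]
    have e3 : k * c + c - k * c = c := by omega
    rw [e3, PySem.List.pyGet?_natCast, List.getElem?_take, if_pos hj, List.getElem?_drop]
    have e4 : k * c + j = j + c * ((k:Int)).toNat := by simp; ring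
    rw [e4]
  rw [List.flatMap_def, List.map_congr_left hstep, ← List.flatMap_def,
    PySem.List.pyRange_zero_nat r, List.flatMap_map]
  simp only [Int.toNat_natCast]
  rw [flatMap_optToList]

theorem main_eq (text : String) (rows : Int) (cols : Int) :
    layer4_box text rows cols = layer4_box_alt text rows cols := by
  by_cases hdeg : rows ≤ 0 ∨ cols ≤ 0
  · rw [layer4_box_alt, if_pos hdeg]
    rcases (by omega : cols ≤ 0 ∨ 0 < cols) with hcols | hcols
    · have hnil : PySem.List.pyRange 0 cols 1 = [] := PySem.List.pyRange_one_eq_nil hcols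
      simp only [layer4_box, hnil, List.foldl_nil]
    · have hrows : rows ≤ 0 := by omega
      have hnil : PySem.List.pyRange 0 rows 1 = [] := PySem.List.pyRange_one_eq_nil hrows
      simp only [layer4_box, hnil, List.foldl_nil]
      have hfix : ∀ (l : List Int) (init : List Char),
          l.foldl (fun (acc : List Char) (_ : Int) => acc) init = init := by
        intro l
        induction l with
        | nil => intro init; rfl
        | cons x xs ih => intro init; exact ih init
      rw [hfix]
  · have hrpos : 0 < rows := by omega
    have hcpos : 0 < cols := by omega
    obtain ⟨r, rfl⟩ : ∃ r : Nat, rows = (r:Int) := ⟨rows.toNat, by omega⟩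
    obtain ⟨c, rfl⟩ : ∃ c : Nat, cols = (c:Int) := ⟨cols.toNat, by omega⟩
    have hr : 0 < r := by exact_mod_cast hrpos
    have hc : 0 < c := by exact_mod_cast hcpos
    rw [layer4_box, layer4_box_alt, if_neg (by omega)]
    have e : ((r:Int) * (c:Int)) = ((r * c : Nat) : Int) := by push_cast; ring
    have hslice : PySem.List.slice
        (text.toList ++ List.replicate (r * c - text.toList.length) 'X')
        none (some ((r * c : Nat) : Int))
        = (text.toList ++ List.replicate (r * c - text.toList.length) 'X').take (r * c) := by
      rw [PySem.List.slice_to _ (by exact_mod_cast Nat.zero_le (r * c)), Int.toNat_natCast]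
    simp only [e, Int.toNat_natCast]
    simp only [hslice]
    set P : List Char := (text.toList ++ List.replicate (r * c - text.toList.length) 'X').take (r * c) with hPdef
    have hP : P.length = r * c := by
      rw [hPdef]
      simp only [List.length_take, List.length_append, List.length_replicate]
      omega
    simp only [PySem.List.foldl_append_eq_flatMap, List.nil_append]
    congr 1
    have hcol : ∀ col ∈ PySem.List.pyRange 0 (c:Int) 1,
        (PySem.List.pyRange 0 (r:Int) 1).flatMap
          (fun row =>
            (((PySem.List.pyGet?
                  ((PySem.List.pyRange 0 (r:Int) 1).map
                    (fun i => PySem.List.slice P (some (i * (c:Int))) (some ((i + 1) * (c:Int)))))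
                  row).bind
                (fun g => PySem.List.pyGet? g col)).elim [] (fun ch => [ch])))
          = (PySem.List.slice? P (some col) none (c:Int)).getD [] := by
      intro col hcolmem
      obtain ⟨h0, h1⟩ := (PySem.List.mem_pyRange_one).mp hcolmem
      lift col to Nat using h0 with j
      have hj : j < c := by exact_mod_cast h1
      exact colA P r c j hr hc hj hP
    rw [List.flatMap_def, List.map_congr_left hcol, ← List.flatMap_def]

-- ===== VERDICT (by name: the statement is the Claim_ definition above) =====
theorem layer4_box_spec : Claim_equal_layer4_box := by
  intro text rows cols _
  exact main_eq text rows cols
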